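-- pv_equiv track=rewrite | github.com/Valet-V0ult-de-Fur1e/Hotels.ru_test_task | task2.py | task2
-- ===== SOURCE A (Python) =====
-- def task2(numbers:list)->list:
--     if not numbers:
--       return []
--
--     def gcd(a, b):
--         while b:
--             a, b = b, a % b
--         return a
--
--     scm = numbers[0]
--     for number in numbers[1:]:
--         scm = gcd(scm, number)
--
--     return [ num for num in range(2, scm + 1) if scm % num == 0]
-- ===== SOURCE B (Python) =====
-- def task2(numbers: list) -> list:
--     if not numbers:
--         return []
--
--     def gcd(a, b):
--         return a if b == 0 else gcd(b, a % b)
--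
--     g = numbers[0]
--     for n in numbers[1:]:
--         g = gcd(g, n)
--
--     small = []   # divisors <= sqrt(g), ascending (starts with 1 when g >= 1)
--     large = []   # paired divisors g // i, descending
--     i = 1
--     while i * i <= g:
--         if g % i == 0:
--             small.append(i)
--             if i != g // i:
--                 large.append(g // i)
--         i += 1
--     return small[1:] + large[::-1]
-- ===== Notes on version B (the rewrite author's own statement) =====
-- stated objective: alternative
-- what changed: Instead of testing every candidate in range(2, gcd+1), B trial-divides only up to sqrt(gcd), collecting each divisor pair (i, g//i) into an ascending 'small' list and a descending 'large' list and concatenating small[1:] with reversed large; on the measured inputs (long lists, hence small gcd) this is not measurably faster, the cost there being the gcd fold.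
import Mathlib
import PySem

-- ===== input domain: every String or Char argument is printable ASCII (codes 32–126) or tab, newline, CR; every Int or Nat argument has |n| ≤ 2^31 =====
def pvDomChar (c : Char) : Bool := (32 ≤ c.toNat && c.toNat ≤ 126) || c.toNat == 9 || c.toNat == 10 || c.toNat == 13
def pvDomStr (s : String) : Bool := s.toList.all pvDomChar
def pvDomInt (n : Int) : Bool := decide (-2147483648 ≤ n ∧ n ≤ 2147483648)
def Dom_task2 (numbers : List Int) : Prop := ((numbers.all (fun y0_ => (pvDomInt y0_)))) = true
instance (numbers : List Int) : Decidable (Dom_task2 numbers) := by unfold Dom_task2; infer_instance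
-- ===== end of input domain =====

-- B replaces A's full scan of range(2, gcd+1) by trial division up to sqrt(gcd) that collects
-- divisor pairs in two ordered lists (objective: alternative algorithm for the divisor phase).

-- termination fact for both gcd ports: the floor-mod remainder shrinks in absolute value
theorem pvFmodNatAbsLt (a b : Int) (h : b ≠ 0) : (PySem.Int.mod a b).natAbs < b.natAbs := by
  show (a.fmod b).natAbs < b.natAbs
  have he : a % b = a % (-b) := (Int.emod_neg a b).symm
  rcases lt_or_gt_of_ne h with hb | hb
  · have h1 : a % b < -b := by rw [he]; exact Int.emod_lt_of_pos a (by omega)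
    have h2 : 0 ≤ a % b := Int.emod_nonneg a h
    rw [Int.fmod_eq_emod]
    split_ifs with hc
    · rcases hc with hc | hc
      · omega
      · have : a % b = 0 := Int.emod_eq_zero_of_dvd hc
        omega
    · omega
  · have h1 : a % b < b := Int.emod_lt_of_pos a hb
    have h2 : 0 ≤ a % b := Int.emod_nonneg a h
    rw [Int.fmod_eq_emod]
    split_ifs <;> omega

-- ===== PORT A =====
-- A's inner 'def gcd(a, b): while b: a, b = b, a % b; return a'
def pvGcdLoopA (a b : Int) : Int :=
  if b ≠ 0 then pvGcdLoopA b (PySem.Int.mod a b) else a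
termination_by b.natAbs
decreasing_by exact pvFmodNatAbsLt a b (by assumption)

def task2 (numbers : List Int) : List Int :=
  match numbers with
  | [] => []                                   -- if not numbers: return []
  | n0 :: rest =>
    -- scm = numbers[0]; for number in numbers[1:]: scm = gcd(scm, number)
    let scm := rest.foldl (fun a n => pvGcdLoopA a n) n0
    -- [num for num in range(2, scm + 1) if scm % num == 0]
    (PySem.List.pyRange 2 (scm + 1)).filter (fun num => PySem.Int.mod scm num == 0)

-- ===== PORT B =====
-- B's 'def gcd(a, b): return a if b == 0 else gcd(b, a % b)'
def pvGcdRecB (a b : Int) : Int :=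
  if b == 0 then a else pvGcdRecB b (PySem.Int.mod a b)
termination_by b.natAbs
decreasing_by exact pvFmodNatAbsLt a b (by simpa using (by assumption : ¬ (b == 0) = true))

-- B's 'while i * i <= g' loop, carrying the two accumulators small and large
def pvCollect (g i : Int) (small large : List Int) : List Int × List Int :=
  if i * i ≤ g then
    if PySem.Int.mod g i == 0 then
      pvCollect g (i + 1) (small ++ [i])
        (if i != PySem.Int.floordiv g i then large ++ [PySem.Int.floordiv g i] else large)
    else pvCollect g (i + 1) small large
  else (small, large)
termination_by (g + 1 - i).toNat
decreasing_by
  all_goals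
    have h2 : i ≤ i * i := by nlinarith [sq_nonneg (2*i - 1)]
    have h3 : i * i ≤ g := by assumption
    omega

def task2_alt (numbers : List Int) : List Int :=
  match numbers with
  | [] => []
  | n0 :: rest =>
    let g := rest.foldl (fun a n => pvGcdRecB a n) n0
    let p := pvCollect g 1 [] []
    -- small[1:] = drop 1 (non-negative slice start, exact); large[::-1] = reverse
    p.1.drop 1 ++ p.2.reverse

-- ===== PRECONDITION & SPEC =====
def Spec_task2 (numbers : List Int) (out : List Int) : Prop := out = task2_alt numbers
instance (numbers : List Int) (out : List Int) : Decidable (Spec_task2 numbers out) := by unfold Spec_task2; infer_instance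

-- ===== CLAIM (what is proved, stated in full; the proofs are below) =====
def Claim_equal_task2 : Prop := ∀ (numbers : List Int), Dom_task2 numbers → Spec_task2 numbers (task2 numbers)

-- ===== LEMMAS AND PROOFS =====

theorem pvGcd_eq (a b : Int) : pvGcdLoopA a b = pvGcdRecB a b := by
  rw [pvGcdLoopA, pvGcdRecB]
  by_cases hb : b = 0
  · simp [hb]
  · simp only [hb, if_neg, ne_eq, not_false_eq_true, if_true, beq_iff_eq]
    exact pvGcd_eq b (PySem.Int.mod a b)
termination_by b.natAbs
decreasing_by exact pvFmodNatAbsLt a b hb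

-- the predicates the loop's two accumulators realize, and the filter forms of the accumulators
def pvSmP (g j : Int) : Bool := decide (j * j ≤ g) && (PySem.Int.mod g j == 0)
def pvLaP (g j : Int) : Bool := pvSmP g j && (j != PySem.Int.floordiv g j)
def pvSm (g i : Int) : List Int := (PySem.List.pyRange i (g+1)).filter (pvSmP g)
def pvLa (g i : Int) : List Int :=
  ((PySem.List.pyRange i (g+1)).filter (pvLaP g)).map (fun j => PySem.Int.floordiv g j)

theorem pvFloordivExact (g b k : Int) (hb : 0 < b) (h : g = b * k) :
    PySem.Int.floordiv g b = k := by
  rw [PySem.Int.floordiv_eq_ediv_of_pos hb, h, Int.mul_ediv_cancel_left k (by omega)]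

theorem pvCollect_spec (g : Int) (_hg : 2 ≤ g) :
    ∀ (n : Nat) (i : Int) (s l : List Int), 1 ≤ i → (g + 1 - i).toNat = n →
      pvCollect g i s l = (s ++ pvSm g i, l ++ pvLa g i) := by
  intro n
  induction n using Nat.strong_induction_on with
  | _ n IH =>
    intro i s l hi hn
    rw [pvCollect]
    by_cases hii : i * i ≤ g
    · have hle : i ≤ i * i := by nlinarith [sq_nonneg (2*i - 1)]
      have hig : i ≤ g := le_trans hle hii
      have hcons : PySem.List.pyRange i (g+1) = i :: PySem.List.pyRange (i+1) (g+1) :=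
        PySem.List.pyRange_one_cons (by omega)
      have hrec : ∀ s' l', pvCollect g (i+1) s' l' = (s' ++ pvSm g (i+1), l' ++ pvLa g (i+1)) :=
        fun s' l' => IH ((g + 1 - (i+1)).toNat) (by omega) (i+1) s' l' (by omega) rfl
      by_cases hmod : (PySem.Int.mod g i == 0) = true
      · have hsmp : pvSmP g i = true := by simp [pvSmP, hii, hmod]
        have hSm : pvSm g i = i :: pvSm g (i+1) := by
          rw [pvSm, hcons, List.filter_cons, if_pos hsmp]; rfl
        by_cases hne : (i != PySem.Int.floordiv g i) = true
        · have hlap : pvLaP g i = true := by simp [pvLaP, hsmp, hne]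
          have hLa : pvLa g i = PySem.Int.floordiv g i :: pvLa g (i+1) := by
            rw [pvLa, hcons, List.filter_cons, if_pos hlap]; rfl
          rw [if_pos hii, if_pos hmod, if_pos hne, hrec, hSm, hLa]
          simp
        · have hlap : pvLaP g i = false := by
            simp only [pvLaP] at *
            simp only [Bool.and_eq_false_iff]
            right; simpa using hne
          have hLa : pvLa g i = pvLa g (i+1) := by
            rw [pvLa, hcons, List.filter_cons, if_neg (by simp [hlap])]; rfl
          rw [if_pos hii, if_pos hmod, if_neg hne, hrec, hSm, hLa]
          simp
      · have hsmp : pvSmP g i = false := by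
          simp only [pvSmP]; simp only [Bool.and_eq_false_iff]; right; simpa using hmod
        have hlap : pvLaP g i = false := by simp [pvLaP, hsmp]
        have hSm : pvSm g i = pvSm g (i+1) := by
          rw [pvSm, hcons, List.filter_cons, if_neg (by simp [hsmp])]; rfl
        have hLa : pvLa g i = pvLa g (i+1) := by
          rw [pvLa, hcons, List.filter_cons, if_neg (by simp [hlap])]; rfl
        rw [if_pos hii, if_neg hmod, hrec, hSm, hLa]
    · have hnil : ∀ j ∈ PySem.List.pyRange i (g+1), pvSmP g j = false := by
        intro j hj
        have hji : i ≤ j := (PySem.List.mem_pyRange_one.mp hj).1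
        have : i * i ≤ j * j := mul_le_mul hji hji (by omega) (by omega)
        simp only [pvSmP]; simp only [Bool.and_eq_false_iff]; left
        simp; omega
      have hSm : pvSm g i = [] := List.filter_eq_nil_iff.mpr (by intro a ha; simp [hnil a ha])
      have hLa : pvLa g i = [] := by
        rw [pvLa, List.filter_eq_nil_iff.mpr (by intro a ha; simp [pvLaP, hnil a ha])]; rfl
      rw [if_neg hii, hSm, hLa]
      simp

-- membership characterisations
theorem pvMemF (g x : Int) :
    x ∈ (PySem.List.pyRange 2 (g+1)).filter (fun n => PySem.Int.mod g n == 0) ↔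
      2 ≤ x ∧ x ≤ g ∧ PySem.Int.mod g x = 0 := by
  simp [List.mem_filter, PySem.List.mem_pyRange_one]
  omega

theorem pvMemSm (g x : Int) (_hg : 2 ≤ g) :
    x ∈ pvSm g 2 ↔ 2 ≤ x ∧ x * x ≤ g ∧ PySem.Int.mod g x = 0 := by
  simp only [pvSm, List.mem_filter, PySem.List.mem_pyRange_one, pvSmP, Bool.and_eq_true,
    decide_eq_true_eq, beq_iff_eq]
  constructor
  · rintro ⟨⟨h1, _⟩, h2, h3⟩; exact ⟨h1, h2, h3⟩
  · rintro ⟨h1, h2, h3⟩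
    have : x ≤ x * x := by nlinarith [sq_nonneg (2*x - 1)]
    exact ⟨⟨h1, by omega⟩, h2, h3⟩

theorem pvMemLa (g x : Int) (hg : 2 ≤ g) :
    x ∈ pvLa g 1 ↔ 1 ≤ x ∧ x ≤ g ∧ PySem.Int.mod g x = 0 ∧ g < x * x := by
  simp only [pvLa, List.mem_map, List.mem_filter, PySem.List.mem_pyRange_one, pvLaP, pvSmP,
    Bool.and_eq_true, decide_eq_true_eq, beq_iff_eq, bne_iff_ne, ne_eq]
  constructor
  · rintro ⟨j, ⟨⟨hj1, _⟩, ⟨hjj, hjmod⟩, hjne⟩, hfx⟩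
    obtain ⟨k, hk⟩ := (PySem.Int.mod_eq_zero_iff_dvd g j).mp hjmod
    have hfd : PySem.Int.floordiv g j = k := pvFloordivExact g j k (by omega) hk
    subst hfx
    rw [hfd] at hjne ⊢
    have hk1 : 1 ≤ k := by nlinarith
    have hjk : j ≤ k := by nlinarith
    have hjk' : j < k := lt_of_le_of_ne hjk (by omega)
    refine ⟨hk1, by nlinarith, ?_, by nlinarith⟩
    exact (PySem.Int.mod_eq_zero_iff_dvd g k).mpr ⟨j, by linarith [hk, mul_comm j k]⟩
  · rintro ⟨hx1, hxg, hxmod, hxx⟩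
    obtain ⟨k, hk⟩ := (PySem.Int.mod_eq_zero_iff_dvd g x).mp hxmod
    have hk1 : 1 ≤ k := by nlinarith
    have hkx : k < x := by nlinarith
    refine ⟨k, ⟨⟨hk1, by nlinarith⟩, ⟨by nlinarith, ?_⟩, ?_⟩, ?_⟩
    · exact (PySem.Int.mod_eq_zero_iff_dvd g k).mpr ⟨x, by rw [hk]; ring⟩
    · rw [pvFloordivExact g k x (by omega) (by rw [hk]; ring)]; omega
    · exact pvFloordivExact g k x (by omega) (by rw [hk]; ring)

-- the divisor lists produced by the two algorithms coincide
theorem pvDivisors_eq (g : Int) :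
    (PySem.List.pyRange 2 (g+1)).filter (fun n => PySem.Int.mod g n == 0)
      = (pvCollect g 1 [] []).1.drop 1 ++ (pvCollect g 1 [] []).2.reverse := by
  rcases le_or_gt g 0 with hg | hg
  · have hc : pvCollect g 1 [] [] = ([], []) := by
      rw [pvCollect, if_neg (by omega : ¬ (1 : Int) * 1 ≤ g)]
    rw [hc, PySem.List.pyRange_one_eq_nil (by omega)]
    rfl
  · rcases eq_or_lt_of_le (show (1:Int) ≤ g by omega) with hg1 | hg2
    · -- g = 1
      have hg1' : g = 1 := hg1.symm
      subst hg1'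
      have hc : pvCollect 1 1 [] [] = ([1], []) := by
        rw [pvCollect, if_pos (by norm_num), if_pos (by norm_num [PySem.Int.mod, Int.fmod]),
          pvCollect, if_neg (by norm_num)]
        norm_num [PySem.Int.floordiv]
      rw [hc, PySem.List.pyRange_one_eq_nil (by norm_num)]
      rfl
    · -- g ≥ 2
      have hg2' : 2 ≤ g := hg2
      have hc := pvCollect_spec g hg2' ((g + 1 - 1).toNat) 1 [] [] (by omega) rfl
      have hcons : PySem.List.pyRange 1 (g+1) = 1 :: PySem.List.pyRange 2 (g+1) :=
        PySem.List.pyRange_one_cons (by omega)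
      have hsmp1 : pvSmP g 1 = true := by
        simp [pvSmP]; omega
      have hSm1 : pvSm g 1 = 1 :: pvSm g 2 := by
        rw [pvSm, hcons, List.filter_cons, if_pos hsmp1]; rfl
      rw [hc, hSm1]
      simp only [List.nil_append, List.drop_succ_cons, List.drop_zero]
      -- both sides are strictly increasing lists with the same members
      have hF : ((PySem.List.pyRange 2 (g+1)).filter
          (fun n => PySem.Int.mod g n == 0)).Pairwise (· < ·) :=
        (PySem.List.pairwise_lt_pyRange_one 2 (g+1)).filter _
      have hSm : (pvSm g 2).Pairwise (· < ·) :=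
        (PySem.List.pairwise_lt_pyRange_one 2 (g+1)).filter _
      have hLaD : (pvLa g 1).Pairwise (fun a b => b < a) := by
        rw [pvLa, List.pairwise_map]
        refine List.Pairwise.imp_of_mem ?_
          ((PySem.List.pairwise_lt_pyRange_one 1 (g+1)).filter (pvLaP g))
        intro a b ha hb hab
        simp only [List.mem_filter, PySem.List.mem_pyRange_one, pvLaP, pvSmP, Bool.and_eq_true,
          decide_eq_true_eq, beq_iff_eq] at ha hb
        obtain ⟨ka, hka⟩ := (PySem.Int.mod_eq_zero_iff_dvd g a).mp ha.2.1.2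
        obtain ⟨kb, hkb⟩ := (PySem.Int.mod_eq_zero_iff_dvd g b).mp hb.2.1.2
        rw [pvFloordivExact g a ka (by omega) hka, pvFloordivExact g b kb (by omega) hkb]
        have ha1 : 1 ≤ a := ha.1.1
        have hkb1 : 1 ≤ kb := by nlinarith
        nlinarith
      have hRev : ((pvLa g 1).reverse).Pairwise (· < ·) := List.pairwise_reverse.mpr hLaD
      have hCross : ∀ x ∈ pvSm g 2, ∀ y ∈ (pvLa g 1).reverse, x < y := by
        intro x hx y hy
        rw [List.mem_reverse] at hy
        obtain ⟨hx2, hxx, -⟩ := (pvMemSm g x hg2').mp hx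
        obtain ⟨hy1, -, -, hyy⟩ := (pvMemLa g y hg2').mp hy
        nlinarith
      have hR : (pvSm g 2 ++ (pvLa g 1).reverse).Pairwise (· < ·) :=
        List.pairwise_append.mpr ⟨hSm, hRev, hCross⟩
      have ndF : ((PySem.List.pyRange 2 (g+1)).filter
          (fun n => PySem.Int.mod g n == 0)).Nodup := hF.imp (fun h => ne_of_lt h)
      have ndR : (pvSm g 2 ++ (pvLa g 1).reverse).Nodup := hR.imp (fun h => ne_of_lt h)
      have hmem : ∀ x, x ∈ (PySem.List.pyRange 2 (g+1)).filter
          (fun n => PySem.Int.mod g n == 0) ↔ x ∈ pvSm g 2 ++ (pvLa g 1).reverse := by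
        intro x
        rw [pvMemF, List.mem_append, List.mem_reverse, pvMemSm g x hg2', pvMemLa g x hg2']
        constructor
        · rintro ⟨h1, h2, h3⟩
          rcases le_or_gt (x * x) g with h4 | h4
          · exact Or.inl ⟨h1, h4, h3⟩
          · exact Or.inr ⟨by omega, h2, h3, h4⟩
        · rintro (⟨h1, h2, h3⟩ | ⟨h1, h2, h3, h4⟩)
          · have : x ≤ x * x := by nlinarith [sq_nonneg (2*x - 1)]
            exact ⟨h1, by omega, h3⟩
          · have : 2 ≤ x := by nlinarith
            exact ⟨this, h2, h3⟩
      exact List.Perm.eq_of_pairwise (fun a b _ _ h1 h2 => absurd h2 (lt_asymm h1)) hF hR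
        ((List.perm_ext_iff_of_nodup ndF ndR).mpr hmem)

-- ===== VERDICT (by name: the statement is the Claim_ definition above) =====
theorem task2_spec : Claim_equal_task2 := by
  intro numbers _
  unfold Spec_task2
  match numbers with
  | [] => rfl
  | n0 :: rest =>
    simp only [task2, task2_alt]
    have hgcd : (fun a n => pvGcdLoopA a n) = (fun a n => pvGcdRecB a n) :=
      funext fun a => funext fun n => pvGcd_eq a n
    rw [hgcd]
    exact pvDivisors_eq _
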